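-- pv_equiv track=rewrite | github.com/awslabs/sockeye | sockeye/mass.py | unfold_segments
-- ===== SOURCE A (Python) =====
-- def unfold_segments(segs, start=1):
--     """Unfold the random mask segments, for example:
--         The shuffle segment is [2, 0, 0, 2, 0],
--         so the masked segment is like:
--         [1, 1, 0, 0, 1, 1, 0]
--         [1, 2, 3, 4, 5, 6, 7] (positions)
--         (1 means this token will be masked, otherwise not)
--         We return the position of the masked tokens like:
--         [1, 2, 5, 6]
--     """
--     pos = []
--     curr = start  # We (optionally) do not mask the start token
--     for l in segs:
--         if l >= 1:
--             pos.extend([curr + i for i in range(l)])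
--             curr += l
--         else:
--             curr += 1
--     return pos
-- ===== SOURCE B (Python) =====
-- def unfold_segments(segs, start=1):
--     # Build an explicit 0/1 mask (as in the docstring illustration), then
--     # collect the positions of the 1s in a second enumerate pass.
--     mask = []
--     for l in segs:
--         if l >= 1:
--             mask.extend([1] * l)
--         else:
--             mask.append(0)
--     return [start + i for i, m in enumerate(mask) if m]
-- ===== Notes on version B (the rewrite author's own statement) =====
-- stated objective: alternative
-- what changed: Replaces the single running-position accumulation with two passes: first materialize the 0/1 mask list the docstring illustrates, then enumerate it and collect start+i for the 1 entries.
import Mathlib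
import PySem

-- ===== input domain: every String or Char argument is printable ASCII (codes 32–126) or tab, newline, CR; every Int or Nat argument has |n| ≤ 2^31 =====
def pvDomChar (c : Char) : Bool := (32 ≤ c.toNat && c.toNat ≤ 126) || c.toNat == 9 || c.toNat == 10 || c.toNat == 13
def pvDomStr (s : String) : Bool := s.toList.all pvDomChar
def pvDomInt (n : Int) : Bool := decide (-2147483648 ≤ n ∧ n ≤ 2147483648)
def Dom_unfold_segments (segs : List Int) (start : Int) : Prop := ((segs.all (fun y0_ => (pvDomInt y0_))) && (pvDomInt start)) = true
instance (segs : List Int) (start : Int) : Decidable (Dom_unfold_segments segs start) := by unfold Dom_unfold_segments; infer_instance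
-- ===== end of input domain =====

-- B builds the explicit 0/1 mask list and then collects masked positions in a
-- second enumerate pass, instead of A's single pass with a running position counter.


-- ===== PORT A =====
-- A's loop state: (pos, curr); per element either extend pos with [curr+i for i in range(l)] or skip one position.
def pvStepA (st : List Int × Int) (l : Int) : List Int × Int :=
  if l ≥ 1 then (st.1 ++ (PySem.List.pyRange 0 l 1).map (fun i => st.2 + i), st.2 + l)
  else (st.1, st.2 + 1)

def unfold_segments (segs : List Int) (start : Int) : List Int :=
  (segs.foldl pvStepA ([], start)).1

-- ===== PORT B =====
-- B's first pass: append [1]*l or a single 0 to the mask.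
def pvStepB (m : List Int) (l : Int) : List Int :=
  if l ≥ 1 then m ++ PySem.List.pyRepeat [(1 : Int)] l else m ++ [0]

def unfold_segments_alt (segs : List Int) (start : Int) : List Int :=
  let mask := segs.foldl pvStepB []
  (PySem.List.enumerate mask 0).filterMap
    (fun p => if p.2 ≠ 0 then some (start + p.1) else none)

-- ===== PRECONDITION & SPEC =====
def Spec_unfold_segments (segs : List Int) (start : Int) (out : List Int) : Prop := out = unfold_segments_alt segs start
instance (segs : List Int) (start : Int) (out : List Int) : Decidable (Spec_unfold_segments segs start out) := by unfold Spec_unfold_segments; infer_instance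

-- ===== CLAIM (what is proved, stated in full; the proofs are below) =====
def Claim_equal_unfold_segments : Prop := ∀ (segs : List Int) (start : Int), Dom_unfold_segments segs start → Spec_unfold_segments segs start (unfold_segments segs start)

-- ===== LEMMAS AND PROOFS =====

-- common recursive shape of A's result, with curr as parameter
def pvCore (segs : List Int) (curr : Int) : List Int :=
  match segs with
  | [] => []
  | l :: ls =>
    if l ≥ 1 then (PySem.List.pyRange 0 l 1).map (fun i => curr + i) ++ pvCore ls (curr + l)
    else pvCore ls (curr + 1)

-- B's mask, structurally
def pvMask (segs : List Int) : List Int :=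
  match segs with
  | [] => []
  | l :: ls => (if l ≥ 1 then PySem.List.pyRepeat [(1 : Int)] l else [0]) ++ pvMask ls

-- B's second pass, with the enumerate offset generalized
def pvCollect (start : Int) (m : List Int) (s : Int) : List Int :=
  (PySem.List.enumerate m s).filterMap (fun p => if p.2 ≠ 0 then some (start + p.1) else none)

theorem pvFoldA (segs : List Int) : ∀ (pos : List Int) (curr : Int),
    (segs.foldl pvStepA (pos, curr)).1 = pos ++ pvCore segs curr := by
  induction segs with
  | nil => intro pos curr; simp [pvCore]
  | cons l ls ih =>
    intro pos curr
    by_cases h : l ≥ 1 <;> simp [pvStepA, pvCore, h, ih]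

theorem pvFoldB (segs : List Int) : ∀ (m : List Int),
    segs.foldl pvStepB m = m ++ pvMask segs := by
  induction segs with
  | nil => intro m; simp [pvMask]
  | cons l ls ih =>
    intro m
    by_cases h : l ≥ 1 <;> simp [pvStepB, pvMask, h, ih]

theorem pvCollect_append (start : Int) (m1 m2 : List Int) (s : Int) :
    pvCollect start (m1 ++ m2) s = pvCollect start m1 s ++ pvCollect start m2 (s + m1.length) := by
  simp [pvCollect, PySem.List.enumerate_append, List.filterMap_append]

theorem pvCollect_ones (start : Int) (n : Nat) : ∀ (s : Int),
    pvCollect start (List.replicate n (1 : Int)) s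
      = (List.range n).map (fun k : Nat => start + s + (k : Int)) := by
  induction n with
  | zero => intro s; simp [pvCollect, PySem.List.enumerate_nil]
  | succ n ih =>
    intro s
    rw [List.replicate_succ, List.range_succ_eq_map]
    simp only [pvCollect, PySem.List.enumerate_cons, List.filterMap_cons] at ih ⊢
    rw [ih]
    norm_num [List.map_map, Function.comp]
    intro a _
    ring

theorem pvMain (start : Int) (segs : List Int) : ∀ (s : Int),
    pvCollect start (pvMask segs) s = pvCore segs (start + s) := by
  induction segs with
  | nil => intro s; simp [pvMask, pvCore, pvCollect]
  | cons l ls ih =>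
    intro s
    by_cases h : l ≥ 1
    · have hl : ((l.toNat : Int)) = l := Int.toNat_of_nonneg (by omega)
      simp only [pvMask, pvCore, h, if_pos]
      rw [pvCollect_append, ih]
      rw [PySem.List.pyRepeat_singleton, List.length_replicate, pvCollect_ones]
      rw [PySem.List.pyRange_one]
      have hn : ((l : Int) - 0).toNat = l.toNat := by omega
      rw [hn, List.map_map]
      congr 1
      · exact List.map_congr_left fun k _ => by simp [Function.comp]
      · rw [hl]; ring_nf
    · simp only [pvMask, pvCore, h, if_neg, not_false_iff]
      rw [pvCollect_append, ih]
      have : pvCollect start [0] s = [] := by simp [pvCollect]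
      rw [this]
      simp only [List.length_cons, List.length_nil, List.nil_append]
      congr 1
      push_cast
      ring

-- ===== VERDICT (by name: the statement is the Claim_ definition above) =====
theorem unfold_segments_spec : Claim_equal_unfold_segments := by
  intro segs start _
  unfold Spec_unfold_segments unfold_segments unfold_segments_alt
  rw [pvFoldA, pvFoldB]
  show [] ++ pvCore segs start = pvCollect start ([] ++ pvMask segs) 0
  rw [List.nil_append, List.nil_append, pvMain, add_zero]
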